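-- pv_equiv track=rewrite | github.com/AP-MI-2021/lab-3-bilcdenisa | main.py | get_longest_same_div_count
-- ===== SOURCE A (Python) =====
-- def has_same_div_count(lista):
--     # verifica daca elementele din lista au acelasi numar de divizori
--     # :param lista: subsecventa pe care o verificam
--     # :return: returnam true daca elementele au acelasi numar de divizori, false in caz contrar
--
--
--     #verific cati divizori are primul numar din lista
--     nr_divizori = 0
--     for divizor in range(1,lista[0]+1):
--         if lista[0]%divizor == 0:
--             nr_divizori +=1
--
--     #verific daca restul elementelor au acelasi nr de divizori
--     for element in lista:
--         nr_divizori2 = 0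
--         for divizor in range(1,element+1):
--             if element % divizor == 0:
--                 nr_divizori2 +=1
--         if nr_divizori != nr_divizori2:
--             return False
--
--     return True
--
-- def get_longest_same_div_count(lst: list[int]) -> list[int]:
--     # determina cea mai lunga secventa cu proprietatea ca toate numerele au acelasi numar de divizori
--     # :param lst: lista in care cautam subsecventa
--     # :return: returnam subsecventa gasita
--
--     lista_secvente= []
--     n = len(lst)
--     if n == 1:
--         return lst
--
--     for inceput in range(n):
--         for sfarsit in range(inceput,n):
--             if has_same_div_count(lst[inceput:sfarsit+1]):
--                 lista_secvente.append(lst[inceput:sfarsit+1])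
--
--     maxim = []
--
--     for secventa in lista_secvente:
--         if len(secventa) > len(maxim):
--             maxim = secventa
--
--     return maxim
-- ===== SOURCE B (Python) =====
-- def get_longest_same_div_count(lst: list[int]) -> list[int]:
--     # single pass: divisor counts computed once per element, then longest run of equal counts
--     counts = []
--     for x in lst:
--         c = 0
--         for d in range(1, x + 1):
--             if x % d == 0:
--                 c += 1
--         counts.append(c)
--     best_start = 0
--     best_len = 0
--     run_start = 0
--     for i in range(len(counts)):
--         if i > 0 and counts[i] != counts[i - 1]:
--             run_start = i
--         if i - run_start + 1 > best_len:
--             best_len = i - run_start + 1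
--             best_start = run_start
--     return lst[best_start:best_start + best_len]
-- ===== Notes on version B (the rewrite author's own statement) =====
-- stated objective: faster
-- what changed: B computes each element's divisor count once and finds the longest run of equal counts in a single left-to-right scan, replacing A's enumeration of all O(n^2) contiguous slices with a full divisor recount of every element of every slice.
import Mathlib
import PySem

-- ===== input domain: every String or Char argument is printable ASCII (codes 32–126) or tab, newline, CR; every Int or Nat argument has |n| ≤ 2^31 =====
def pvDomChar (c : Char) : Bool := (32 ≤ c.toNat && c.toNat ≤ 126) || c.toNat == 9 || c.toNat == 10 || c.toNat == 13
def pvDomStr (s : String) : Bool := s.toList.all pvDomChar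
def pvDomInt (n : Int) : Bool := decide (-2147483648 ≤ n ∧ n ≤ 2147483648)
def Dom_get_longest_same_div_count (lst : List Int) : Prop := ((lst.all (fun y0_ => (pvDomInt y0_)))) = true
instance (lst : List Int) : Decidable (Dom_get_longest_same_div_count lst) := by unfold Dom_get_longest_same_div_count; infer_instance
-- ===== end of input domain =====

-- B computes divisor counts once and finds the longest equal-count run in one scan instead of
-- recounting divisors for every element of every contiguous slice (faster; return value only).

-- ===== PORT A =====
-- the divisor-counting loop of has_same_div_count (it appears twice in the Python, same loop)
def pvDivCountA (x : Int) : Int :=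
  (PySem.List.pyRange 1 (x + 1)).foldl
    (fun nr d => if PySem.Int.mod x d == 0 then nr + 1 else nr) 0

def has_same_div_count (lista : List Int) : Bool :=
  -- nr_divizori of lista[0]; A only calls this on nonempty slices, so lista[0] is headI
  let nr := pvDivCountA lista.headI
  -- the element loop with its early 'return False'
  lista.all (fun e => pvDivCountA e == nr)

def get_longest_same_div_count (lst : List Int) : List Int :=
  let n : Int := lst.length
  if n == 1 then lst else
  let lista_secvente : List (List Int) :=
    (PySem.List.pyRange 0 n).foldl (fun acc i =>
      (PySem.List.pyRange i n).foldl (fun acc2 j =>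
        if has_same_div_count (PySem.List.slice lst (some i) (some (j + 1))) then
          acc2 ++ [PySem.List.slice lst (some i) (some (j + 1))]
        else acc2) acc) []
  lista_secvente.foldl (fun maxim s => if s.length > maxim.length then s else maxim) []

-- ===== PORT B =====
-- B's divisor-count loop (computed once per element)
def pvDivCountB (x : Int) : Int :=
  (PySem.List.pyRange 1 (x + 1)).foldl
    (fun c d => if PySem.Int.mod x d == 0 then c + 1 else c) 0

def get_longest_same_div_count_alt (lst : List Int) : List Int :=
  let counts : List Int := lst.foldl (fun acc x => acc ++ [pvDivCountB x]) []
  -- state = (best_start, best_len, run_start)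
  let st : Int × Int × Int :=
    (PySem.List.pyRange 0 (counts.length : Int)).foldl (fun st i =>
      let rs := if i > 0 && !(PySem.List.pyGetD counts i 0 == PySem.List.pyGetD counts (i - 1) 0)
                then i else st.2.2
      if i - rs + 1 > st.2.1 then (rs, i - rs + 1, rs) else (st.1, st.2.1, rs)) (0, 0, 0)
  PySem.List.slice lst (some st.1) (some (st.1 + st.2.1))

-- ===== PRECONDITION & SPEC =====
def Spec_get_longest_same_div_count (lst : List Int) (out : List Int) : Prop := out = get_longest_same_div_count_alt lst
instance (lst : List Int) (out : List Int) : Decidable (Spec_get_longest_same_div_count lst out) := by unfold Spec_get_longest_same_div_count; infer_instance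

-- ===== CLAIM (what is proved, stated in full; the proofs are below) =====
def Claim_equal_get_longest_same_div_count : Prop := ∀ (lst : List Int), Dom_get_longest_same_div_count lst → Spec_get_longest_same_div_count lst (get_longest_same_div_count lst)

-- ===== LEMMAS AND PROOFS =====

-- divisor count of the element at (in-range) index k
def cAt (lst : List Int) (k : Int) : Int := pvDivCountA (PySem.List.pyGetD lst k 0)

-- one past the end of the maximal constant-cAt run starting at s
def runEnd (lst : List Int) (s : Int) : Int :=
  if h : s + 1 < (lst.length : Int) ∧ cAt lst (s + 1) = cAt lst s then runEnd lst (s + 1)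
  else s + 1
termination_by ((lst.length : Int) - s).toNat
decreasing_by omega

theorem runEnd_gt (lst : List Int) (s : Int) : s < runEnd lst s := by
  rw [runEnd]
  split
  · have ih := runEnd_gt lst (s + 1)
    omega
  · omega
termination_by ((lst.length : Int) - s).toNat
decreasing_by omega

theorem runEnd_le (lst : List Int) (s : Int) (h : s < (lst.length : Int)) :
    runEnd lst s ≤ (lst.length : Int) := by
  rw [runEnd]
  split
  · exact runEnd_le lst (s + 1) (by omega)
  · omega
termination_by ((lst.length : Int) - s).toNat
decreasing_by omega

theorem runEnd_const (lst : List Int) (s k : Int) (h1 : s ≤ k) (h2 : k < runEnd lst s) :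
    cAt lst k = cAt lst s := by
  rcases eq_or_lt_of_le h1 with rfl | hlt
  · rfl
  · rw [runEnd] at h2
    split at h2
    · rename_i hc
      rw [runEnd_const lst (s + 1) k (by omega) h2, hc.2]
    · omega
termination_by ((lst.length : Int) - s).toNat
decreasing_by omega

theorem runEnd_boundary (lst : List Int) (s : Int) (hsn : s < (lst.length : Int)) :
    runEnd lst s = (lst.length : Int) ∨ cAt lst (runEnd lst s) ≠ cAt lst s := by
  rw [runEnd]
  split
  · rename_i hc
    rcases runEnd_boundary lst (s + 1) hc.1 with h | h
    · exact Or.inl h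
    · exact Or.inr (by rw [hc.2] at h; exact h)
  · rename_i hc
    rcases lt_or_ge (s + 1) (lst.length : Int) with h | h
    · exact Or.inr (fun hEq => hc ⟨h, hEq⟩)
    · exact Or.inl (by omega)
termination_by ((lst.length : Int) - s).toNat
decreasing_by omega

theorem runEnd_congr (lst : List Int) (s i : Int) (h1 : s ≤ i) (h2 : i < runEnd lst s) :
    runEnd lst i = runEnd lst s := by
  rcases eq_or_lt_of_le h1 with rfl | hlt
  · rfl
  · have hgt := runEnd_gt lst s
    conv_rhs => rw [runEnd]
    rw [runEnd] at h2
    split at h2 <;> rename_i hc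
    · rw [runEnd_congr lst (s + 1) i (by omega) h2]
      rw [runEnd]
      simp [hc]
    · omega
termination_by ((lst.length : Int) - s).toNat
decreasing_by omega

theorem slice_length_int (lst : List Int) (a b : Int) (h0 : 0 ≤ a) (h1 : a ≤ b)
    (h2 : b ≤ (lst.length : Int)) :
    ((PySem.List.slice lst (some a) (some b)).length : Int) = b - a := by
  rw [PySem.List.slice_toNat lst h0 (by omega)]
  simp only [List.length_take, List.length_drop]
  omega

-- has_same_div_count on a nonempty in-range slice = all divisor counts equal the first one
theorem valid_iff (lst : List Int) (i e : Int) (h0 : 0 ≤ i) (h1 : i < e)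
    (h2 : e ≤ (lst.length : Int)) :
    has_same_div_count (PySem.List.slice lst (some i) (some e)) = true ↔
      (∀ k, i ≤ k → k < e → cAt lst k = cAt lst i) := by
  have ha : i.toNat < lst.length := by omega
  rw [PySem.List.slice_toNat lst h0 (by omega)]
  set seg := List.take (e.toNat - i.toNat) (List.drop i.toNat lst) with hseg
  clear_value seg
  have hlen : seg.length = e.toNat - i.toNat := by
    simp only [hseg, List.length_take, List.length_drop]; omega
  have hget : ∀ (k : Nat) (hk : k < e.toNat - i.toNat),
      seg[k]'(by omega) = lst[i.toNat + k]'(by omega) := by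
    intro k hk
    simp only [hseg]
    rw [List.getElem_take, List.getElem_drop]
  have hne : 0 < seg.length := by omega
  have hhead : seg.headI = lst[i.toNat] := by
    have h0' : seg.headI = seg[0]'hne := by
      cases seg with
      | nil => simp at hne
      | cons x t => rfl
    rw [h0', hget 0 (by omega)]
    exact getElem_congr (c := lst) rfl (by omega) (by omega)
  have hcAt : ∀ (k : Nat) (hk : k < lst.length), cAt lst (k : Int) = pvDivCountA (lst[k]) := by
    intro k hk
    unfold cAt
    rw [PySem.List.pyGetD_eq_getElem lst 0 (by omega) (by exact_mod_cast hk)]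
    exact congrArg pvDivCountA (getElem_congr (c := lst) rfl (by omega) (by omega))
  have hcAti : cAt lst i = pvDivCountA (lst[i.toNat]) := by
    have hci := hcAt i.toNat ha
    rwa [show ((i.toNat : Nat) : Int) = i by omega] at hci
  simp only [has_same_div_count, List.all_eq_true, beq_iff_eq]
  constructor
  · intro h k hik hke
    have hk : k.toNat < lst.length := by omega
    have hx := h (seg[k.toNat - i.toNat]'(by omega)) (List.getElem_mem _)
    rw [hget (k.toNat - i.toNat) (by omega), hhead] at hx
    rw [show k = ((k.toNat : Nat) : Int) by omega, hcAt k.toNat hk, hcAti]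
    rw [getElem_congr (c := lst) rfl (show i.toNat + (k.toNat - i.toNat) = k.toNat by omega) (by omega)] at hx
    exact hx
  · intro h x hx
    rcases List.mem_iff_getElem.mp hx with ⟨k, hk, rfl⟩
    rw [hget k (by omega), hhead]
    have hmem : i.toNat + k < lst.length := by omega
    have hh := h ((i.toNat + k : Nat) : Int) (by omega) (by push_cast; omega)
    rw [hcAt (i.toNat + k) hmem, hcAti] at hh
    exact hh

theorem valid_iff_runEnd (lst : List Int) (i e : Int) (h0 : 0 ≤ i) (h1 : i < e)
    (h2 : e ≤ (lst.length : Int)) :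
    has_same_div_count (PySem.List.slice lst (some i) (some e)) = true ↔
      e ≤ runEnd lst i := by
  rw [valid_iff lst i e h0 h1 h2]
  constructor
  · intro h
    by_contra hlt
    have hgt := runEnd_gt lst i
    rcases runEnd_boundary lst i (by omega) with hb | hb
    · omega
    · exact hb (h (runEnd lst i) (by omega) (by omega))
  · intro h k h1k h2k
    exact runEnd_const lst i k h1k (by omega)

-- A's fold, fused: per start index i, the net effect on the running maximum
def stepA (lst : List Int) (m : List Int) (i : Int) : List Int :=
  if runEnd lst i - i > (m.length : Int) then PySem.List.slice lst (some i) (some (runEnd lst i))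
  else m

-- B's scan step with the count lookups replaced by cAt (equal on in-range indices)
def stepB (lst : List Int) (st : Int × Int × Int) (i : Int) : Int × Int × Int :=
  let rs := if i > 0 && !(cAt lst i == cAt lst (i - 1)) then i else st.2.2
  if i - rs + 1 > st.2.1 then (rs, i - rs + 1, rs) else (st.1, st.2.1, rs)

theorem A_inner (lst : List Int) (i : Int) (hi : 0 ≤ i)
    (hE : runEnd lst i ≤ (lst.length : Int)) (a : Int) (m : List Int) (hia : i ≤ a) :
      (PySem.List.pyRange a (runEnd lst i)).foldl
        (fun m j => if (PySem.List.slice lst (some i) (some (j + 1))).length > m.length then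
            PySem.List.slice lst (some i) (some (j + 1)) else m) m =
      if runEnd lst i - i > (m.length : Int) ∧ a < runEnd lst i then
        PySem.List.slice lst (some i) (some (runEnd lst i)) else m := by
  rcases lt_or_ge a (runEnd lst i) with hlt | hge
  · rw [PySem.List.pyRange_one_cons hlt, List.foldl_cons]
    have hclen : ((PySem.List.slice lst (some i) (some (a + 1))).length : Int) = a + 1 - i :=
      slice_length_int lst i (a + 1) hi (by omega) (by omega)
    by_cases hfire : (PySem.List.slice lst (some i) (some (a + 1))).length > m.length
    · rw [if_pos hfire]
      rw [A_inner lst i hi hE (a + 1) _ (by omega)]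
      by_cases hend : a + 1 < runEnd lst i
      · rw [if_pos ⟨by omega, hend⟩, if_pos ⟨by omega, hlt⟩]
      · have h1e : a + 1 = runEnd lst i := by omega
        rw [if_neg (by omega), if_pos ⟨by omega, hlt⟩, h1e]
    · rw [if_neg hfire]
      rw [A_inner lst i hi hE (a + 1) m (by omega)]
      by_cases hend : a + 1 < runEnd lst i
      · by_cases hbig : runEnd lst i - i > (m.length : Int)
        · rw [if_pos ⟨hbig, hend⟩, if_pos ⟨hbig, hlt⟩]
        · rw [if_neg (by omega), if_neg (by omega)]
      · have heq : a + 1 = runEnd lst i := by omega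
        rw [if_neg (by omega), if_neg (by omega)]
  · rw [PySem.List.pyRange_one_eq_nil (by omega), List.foldl_nil, if_neg (by omega)]
termination_by (runEnd lst i - a).toNat
decreasing_by all_goals omega

theorem A_eq_foldA (lst : List Int) :
    get_longest_same_div_count lst =
      (PySem.List.pyRange 0 (lst.length : Int)).foldl (stepA lst) [] := by
  unfold get_longest_same_div_count
  by_cases h1 : lst.length = 1
  · rw [if_pos (by simp only [beq_iff_eq]; omega)]
    have hre : runEnd lst 0 = 1 := by
      rw [runEnd, dif_neg (by omega)]
      norm_num
    rw [show ((lst.length : Nat) : Int) = 0 + 1 by omega, PySem.List.pyRange_one_singleton,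
        List.foldl_cons, List.foldl_nil]
    unfold stepA
    rw [hre, if_pos (by simp), PySem.List.slice_toNat lst (by omega) (by omega)]
    simp [List.take_of_length_le, h1]
  · rw [if_neg (by simp only [beq_iff_eq]; omega)]
    have hstep1 : ∀ (acc : List (List Int)) (i : Int), i ∈ PySem.List.pyRange 0 (lst.length : Int) →
        (PySem.List.pyRange i (lst.length : Int)).foldl
          (fun acc2 j => if has_same_div_count (PySem.List.slice lst (some i) (some (j + 1))) then
              acc2 ++ [PySem.List.slice lst (some i) (some (j + 1))] else acc2) acc
        = acc ++ ((PySem.List.pyRange i (lst.length : Int)).filter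
            (fun j => has_same_div_count (PySem.List.slice lst (some i) (some (j + 1))))).map
            (fun j => PySem.List.slice lst (some i) (some (j + 1))) := by
      intro acc i _
      exact PySem.List.foldl_append_if _ _ _ _
    rw [PySem.List.foldl_congr_mem _ _
        (fun acc i => acc ++ ((PySem.List.pyRange i (lst.length : Int)).filter
            (fun j => has_same_div_count (PySem.List.slice lst (some i) (some (j + 1))))).map
            (fun j => PySem.List.slice lst (some i) (some (j + 1)))) _ hstep1,
        PySem.List.foldl_append_eq_flatMap, List.nil_append, List.foldl_flatMap]
    apply PySem.List.foldl_congr_mem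
    intro m i hi
    rw [PySem.List.mem_pyRange_one] at hi
    have hgt := runEnd_gt lst i
    have hle := runEnd_le lst i hi.2
    have hfil : (PySem.List.pyRange i (lst.length : Int)).filter
            (fun j => has_same_div_count (PySem.List.slice lst (some i) (some (j + 1))))
          = PySem.List.pyRange i (runEnd lst i) := by
      rw [List.filter_congr (q := fun j => decide (j + 1 ≤ runEnd lst i))]
      · rw [PySem.List.pyRange_one_append i (runEnd lst i) (lst.length : Int) (by omega) hle,
            List.filter_append]
        rw [List.filter_eq_self.mpr, List.filter_eq_nil_iff.mpr, List.append_nil]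
        · intro j hj
          rw [PySem.List.mem_pyRange_one] at hj
          simp only [decide_eq_true_eq]
          omega
        · intro j hj
          rw [PySem.List.mem_pyRange_one] at hj
          simp only [decide_eq_true_eq]
          omega
      · intro j hj
        rw [PySem.List.mem_pyRange_one] at hj
        rw [Bool.eq_iff_iff]
        simp only [decide_eq_true_eq]
        exact valid_iff_runEnd lst i (j + 1) hi.1 (by omega) (by omega)
    rw [hfil, List.foldl_map, A_inner lst i hi.1 hle i m le_rfl]
    unfold stepA
    by_cases hbig : runEnd lst i - i > (m.length : Int)
    · rw [if_pos ⟨hbig, hgt⟩, if_pos hbig]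
    · rw [if_neg (by omega), if_neg (by omega)]

theorem B_eq_foldB (lst : List Int) :
    get_longest_same_div_count_alt lst =
      (let st := (PySem.List.pyRange 0 (lst.length : Int)).foldl (stepB lst) (0, 0, 0)
       PySem.List.slice lst (some st.1) (some (st.1 + st.2.1))) := by
  unfold get_longest_same_div_count_alt
  dsimp only
  rw [show lst.foldl (fun acc x => acc ++ [pvDivCountB x]) [] = [] ++ lst.map pvDivCountB from
        PySem.List.foldl_append_singleton_eq_map _ _ _, List.nil_append, List.length_map]
  have hg : ∀ k : Int, PySem.List.pyGetD (lst.map pvDivCountB) k 0 = cAt lst k := by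
    intro k
    have h := PySem.List.pyGetD_map pvDivCountB lst k 0
    rw [show pvDivCountB 0 = 0 from rfl] at h
    exact h.trans rfl
  have hfold : (PySem.List.pyRange 0 (lst.length : Int)).foldl
      (fun st i =>
        let rs := if i > 0 && !(PySem.List.pyGetD (lst.map pvDivCountB) i 0 ==
            PySem.List.pyGetD (lst.map pvDivCountB) (i - 1) 0) then i else st.2.2
        if i - rs + 1 > st.2.1 then (rs, i - rs + 1, rs) else (st.1, st.2.1, rs))
      ((0 : Int), (0 : Int), (0 : Int)) =
      (PySem.List.pyRange 0 (lst.length : Int)).foldl (stepB lst) (0, 0, 0) := by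
    apply PySem.List.foldl_congr_mem
    intro st i _
    unfold stepB
    rw [hg, hg]
  rw [hfold]

theorem A_noupd (lst : List Int) (s e : Int) (hse : s ≤ e) (he : e ≤ (lst.length : Int))
    (hrun : ∀ i, s ≤ i → i < e → runEnd lst i = e) (a : Int) (m : List Int)
    (ha : s ≤ a) (_hae : a ≤ e) (hml : e - a ≤ (m.length : Int)) :
      (PySem.List.pyRange a e).foldl (stepA lst) m = m := by
  rcases lt_or_ge a e with hlt | hge
  · rw [PySem.List.pyRange_one_cons hlt, List.foldl_cons,
        show stepA lst m a = m from by unfold stepA; rw [hrun a ha hlt, if_neg (by omega)]]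
    exact A_noupd lst s e hse he hrun (a + 1) m (by omega) (by omega) (by omega)
  · rw [PySem.List.pyRange_one_eq_nil (by omega), List.foldl_nil]
termination_by (e - a).toNat
decreasing_by all_goals omega

theorem A_block (lst : List Int) (s : Int) (hs : 0 ≤ s) (hsn : s < (lst.length : Int)) (m : List Int) :
    (PySem.List.pyRange s (runEnd lst s)).foldl (stepA lst) m =
      if runEnd lst s - s > (m.length : Int) then
        PySem.List.slice lst (some s) (some (runEnd lst s))
      else m := by
  have hgt := runEnd_gt lst s
  have hle := runEnd_le lst s hsn
  have hrun : ∀ i, s ≤ i → i < runEnd lst s → runEnd lst i = runEnd lst s :=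
    fun i h1 h2 => runEnd_congr lst s i h1 h2
  rw [PySem.List.pyRange_one_cons hgt, List.foldl_cons]
  by_cases hbig : runEnd lst s - s > (m.length : Int)
  · rw [if_pos hbig,
        show stepA lst m s = PySem.List.slice lst (some s) (some (runEnd lst s)) from by
          unfold stepA; rw [if_pos hbig]]
    apply A_noupd lst s (runEnd lst s) (by omega) hle hrun (s + 1) _ (by omega) (by omega)
    rw [slice_length_int lst s (runEnd lst s) hs (by omega) hle]
    omega
  · rw [if_neg hbig, show stepA lst m s = m from by unfold stepA; rw [if_neg hbig]]
    exact A_noupd lst s (runEnd lst s) (by omega) hle hrun (s + 1) m (by omega) (by omega)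
      (by omega)

theorem B_run (lst : List Int) (s e : Int) (hs : 0 ≤ s)
    (hconst : ∀ k, s ≤ k → k < e → cAt lst k = cAt lst s) (a bs bl : Int)
    (hsa : s < a) (_hae : a ≤ e) :
      (PySem.List.pyRange a e).foldl (stepB lst) (bs, bl, s) =
        if e - s > bl ∧ a < e then (s, e - s, s) else (bs, bl, s) := by
  rcases lt_or_ge a e with hlt | hge
  · rw [PySem.List.pyRange_one_cons hlt, List.foldl_cons]
    have hrs : stepB lst (bs, bl, s) a =
        if a - s + 1 > bl then (s, a - s + 1, s) else (bs, bl, s) := by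
      unfold stepB
      have hcc : cAt lst a = cAt lst (a - 1) := by
        rw [hconst a (by omega) hlt, hconst (a - 1) (by omega) (by omega)]
      simp only [hcc, beq_self_eq_true, Bool.not_true, Bool.and_false, Bool.false_eq_true,
        if_false]
    rw [hrs]
    by_cases hf : a - s + 1 > bl
    · rw [if_pos hf, B_run lst s e hs hconst (a + 1) s (a - s + 1) (by omega) (by omega)]
      by_cases hend : a + 1 < e
      · rw [if_pos ⟨by omega, hend⟩, if_pos ⟨by omega, hlt⟩]
      · rw [if_neg (by omega), if_pos ⟨by omega, hlt⟩, show a - s + 1 = e - s by omega]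
    · rw [if_neg hf, B_run lst s e hs hconst (a + 1) bs bl (by omega) (by omega)]
      by_cases hend : a + 1 < e
      · by_cases hbig : e - s > bl
        · rw [if_pos ⟨hbig, hend⟩, if_pos ⟨hbig, hlt⟩]
        · rw [if_neg (by omega), if_neg (by omega)]
      · rw [if_neg (by omega), if_neg (by omega)]
  · rw [PySem.List.pyRange_one_eq_nil (by omega), List.foldl_nil, if_neg (by omega)]
termination_by (e - a).toNat
decreasing_by all_goals omega

theorem B_block (lst : List Int) (s bs bl r : Int) (hs : 0 ≤ s) (hbl : 0 ≤ bl)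
    (hr : r = s ∨ (0 < s ∧ (s < (lst.length : Int) → cAt lst s ≠ cAt lst (s - 1))))
    (hsn : s < (lst.length : Int)) :
    (PySem.List.pyRange s (runEnd lst s)).foldl (stepB lst) (bs, bl, r) =
      (if runEnd lst s - s > bl then s else bs,
       if runEnd lst s - s > bl then runEnd lst s - s else bl, s) := by
  have hgt := runEnd_gt lst s
  have hconst : ∀ k, s ≤ k → k < runEnd lst s → cAt lst k = cAt lst s :=
    fun k h1 h2 => runEnd_const lst s k h1 h2
  rw [PySem.List.pyRange_one_cons hgt, List.foldl_cons]
  have hfirst : stepB lst (bs, bl, r) s =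
      if 1 > bl then (s, 1, s) else (bs, bl, s) := by
    unfold stepB
    have hrs : (if s > 0 && !(cAt lst s == cAt lst (s - 1)) then s else r) = s := by
      rcases hr with hr1 | ⟨hpos, hneq⟩
      · by_cases hb : s > 0 && !(cAt lst s == cAt lst (s - 1))
        · rw [if_pos hb]
        · rw [if_neg hb, hr1]
      · rw [if_pos]
        rw [Bool.and_eq_true, Bool.not_eq_eq_eq_not, Bool.not_true, beq_eq_false_iff_ne]
        exact ⟨by simp only [decide_eq_true_eq]; omega, hneq hsn⟩
    rw [hrs]
    dsimp only
    rw [show s - s + 1 = 1 by omega]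
  rw [hfirst]
  by_cases hf : 1 > bl
  · rw [if_pos hf,
        B_run lst s (runEnd lst s) hs hconst (s + 1) s 1 (by omega) (by omega)]
    by_cases hend : s + 1 < runEnd lst s
    · rw [if_pos ⟨by omega, hend⟩, if_pos (by omega), if_pos (by omega)]
    · rw [if_neg (by omega), if_pos (by omega), if_pos (by omega),
          show (1 : Int) = runEnd lst s - s by omega]
  · rw [if_neg hf, B_run lst s (runEnd lst s) hs hconst (s + 1) bs bl (by omega) (by omega)]
    by_cases hend : s + 1 < runEnd lst s
    · by_cases hbig : runEnd lst s - s > bl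
      · rw [if_pos ⟨hbig, hend⟩, if_pos hbig, if_pos hbig]
      · rw [if_neg (by omega), if_neg (by omega), if_neg (by omega)]
    · rw [if_neg (by omega), if_neg (by omega), if_neg (by omega)]

theorem MAIN (lst : List Int) (s bs bl r : Int) (m : List Int)
    (hs0 : 0 ≤ s) (_hsn : s ≤ (lst.length : Int))
    (hr : r = s ∨ (0 < s ∧ (s < (lst.length : Int) → cAt lst s ≠ cAt lst (s - 1))))
    (hbs : 0 ≤ bs) (hbl : 0 ≤ bl) (hbound : bs + bl ≤ (lst.length : Int))
    (hm : m = PySem.List.slice lst (some bs) (some (bs + bl)))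
    (hlen : (m.length : Int) = bl) :
    (PySem.List.pyRange s (lst.length : Int)).foldl (stepA lst) m =
      (let st := (PySem.List.pyRange s (lst.length : Int)).foldl (stepB lst) (bs, bl, r)
       PySem.List.slice lst (some st.1) (some (st.1 + st.2.1))) := by
  rcases lt_or_ge s (lst.length : Int) with hlt | hge
  · have hgt := runEnd_gt lst s
    have hle := runEnd_le lst s hlt
    rw [PySem.List.pyRange_one_append s (runEnd lst s) (lst.length : Int) (by omega) hle,
        List.foldl_append, List.foldl_append,
        A_block lst s hs0 hlt m, B_block lst s bs bl r hs0 hbl hr hlt]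
    have hboundary : runEnd lst s < (lst.length : Int) →
        cAt lst (runEnd lst s) ≠ cAt lst (runEnd lst s - 1) := by
      intro hen
      rcases runEnd_boundary lst s hlt with hb | hb
      · omega
      · rw [runEnd_const lst s (runEnd lst s - 1) (by omega) (by omega)]
        exact hb
    by_cases hbig : runEnd lst s - s > bl
    · rw [if_pos (by omega), if_pos hbig, if_pos hbig]
      exact MAIN lst (runEnd lst s) s (runEnd lst s - s) s
        (PySem.List.slice lst (some s) (some (runEnd lst s)))
        (by omega) (by omega) (Or.inr ⟨by omega, hboundary⟩) hs0 (by omega) (by omega)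
        (by rw [show s + (runEnd lst s - s) = runEnd lst s by omega])
        (slice_length_int lst s (runEnd lst s) hs0 (by omega) hle)
    · rw [if_neg (by omega), if_neg hbig, if_neg hbig]
      exact MAIN lst (runEnd lst s) bs bl s m
        (by omega) (by omega) (Or.inr ⟨by omega, hboundary⟩) hbs hbl hbound hm hlen
  · rw [PySem.List.pyRange_one_eq_nil (by omega)]
    simp only [List.foldl_nil]
    rw [hm, show bs + bl = bs + (m.length : Int) by omega]
termination_by ((lst.length : Int) - s).toNat
decreasing_by all_goals omega

-- ===== VERDICT (by name: the statement is the Claim_ definition above) =====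
theorem get_longest_same_div_count_spec : Claim_equal_get_longest_same_div_count := by
  intro lst _
  unfold Spec_get_longest_same_div_count
  rw [A_eq_foldA, B_eq_foldB]
  have h := MAIN lst 0 0 0 0 [] le_rfl (by exact_mod_cast Int.natCast_nonneg lst.length)
    (Or.inl rfl) le_rfl le_rfl (by exact_mod_cast Int.natCast_nonneg lst.length)
    (by simp [PySem.List.slice_toNat]) (by simp)
  simpa using h
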